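-- pv_equiv track=rewrite | github.com/hlastras/competitive_programming | kattis/sylvester.py | quadrant
-- ===== SOURCE A (Python) =====
-- def quadrant(n, x1, y1):
--   if n == 1:
--     return 1
--
--   mid = n // 2
--   if x1 < mid:
--     if y1 < mid:
--       return quadrant(mid, x1, y1)
--     else:
--       return quadrant(mid, x1, y1-mid)
--   else:
--     if y1 < mid:
--       return quadrant(mid, x1-mid, y1)
--     else:
--       return -1 * quadrant(mid, x1-mid, y1-mid)
-- ===== SOURCE B (Python) =====
-- def quadrant(n, x1, y1):
--     sign = 1
--     while n != 1:
--         mid = n // 2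
--         if x1 >= mid and y1 >= mid:
--             sign = -sign
--         if x1 >= mid:
--             x1 -= mid
--         if y1 >= mid:
--             y1 -= mid
--         n = mid
--     return sign
-- ===== Notes on version B (the rewrite author's own statement) =====
-- stated objective: simpler
-- what changed: Replaces the four-branch recursion with an iterative loop that keeps a running sign, flips it when both coordinates fall in the lower-right quadrant, and reduces the coordinates in place.
import Mathlib
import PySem

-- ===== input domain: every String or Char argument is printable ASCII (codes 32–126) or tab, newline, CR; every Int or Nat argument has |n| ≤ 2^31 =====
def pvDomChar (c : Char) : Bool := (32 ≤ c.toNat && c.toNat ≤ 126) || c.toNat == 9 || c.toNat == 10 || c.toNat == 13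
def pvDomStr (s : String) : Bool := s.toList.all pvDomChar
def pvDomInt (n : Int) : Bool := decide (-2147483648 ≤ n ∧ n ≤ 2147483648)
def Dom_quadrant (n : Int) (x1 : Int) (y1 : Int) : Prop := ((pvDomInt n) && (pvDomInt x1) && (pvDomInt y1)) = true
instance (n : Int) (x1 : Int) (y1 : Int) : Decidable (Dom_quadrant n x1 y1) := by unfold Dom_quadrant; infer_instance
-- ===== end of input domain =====

-- B replaces the recursion by a loop with a running sign: simpler decomposition, same cost.

-- ===== PORT A =====
-- fuel = n.toNat; for 1 ≤ n the recursion depth is at most n.toNat, so the fuel is never exhausted on Pre_.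
def quadrantFuel : Nat → Int → Int → Int → Int
  | 0, _, _, _ => 1
  | f+1, n, x1, y1 =>
    if n = 1 then 1
    else
      let mid := PySem.Int.floordiv n 2
      if x1 < mid then
        if y1 < mid then quadrantFuel f mid x1 y1
        else quadrantFuel f mid x1 (y1 - mid)
      else
        if y1 < mid then quadrantFuel f mid (x1 - mid) y1
        else -1 * quadrantFuel f mid (x1 - mid) (y1 - mid)

def quadrant (n : Int) (x1 : Int) (y1 : Int) : Int := quadrantFuel n.toNat n x1 y1

-- ===== PORT B =====
-- the while loop, fuel = n.toNat as above; state is (sign, n, x1, y1)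
def quadrantLoop : Nat → Int → Int → Int → Int → Int
  | 0, sign, _, _, _ => sign
  | f+1, sign, n, x1, y1 =>
    if n = 1 then sign
    else
      let mid := PySem.Int.floordiv n 2
      let sign' := if mid ≤ x1 ∧ mid ≤ y1 then -sign else sign
      let x1' := if mid ≤ x1 then x1 - mid else x1
      let y1' := if mid ≤ y1 then y1 - mid else y1
      quadrantLoop f sign' mid x1' y1'

def quadrant_alt (n : Int) (x1 : Int) (y1 : Int) : Int := quadrantLoop n.toNat 1 n x1 y1

-- ===== PRECONDITION & SPEC =====
-- Pre_ excludes n ≤ 0, where A recurses forever (Python RecursionError) and B's loop never terminates.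
def Pre_quadrant (n : Int) (x1 : Int) (y1 : Int) : Prop := 1 ≤ n
instance (n : Int) (x1 : Int) (y1 : Int) : Decidable (Pre_quadrant n x1 y1) := by unfold Pre_quadrant; infer_instance
def pvWitness_quadrant : Int × Int × Int := (8, 3, 5)

def Spec_quadrant (n : Int) (x1 : Int) (y1 : Int) (out : Int) : Prop := out = quadrant_alt n x1 y1
instance (n : Int) (x1 : Int) (y1 : Int) (out : Int) : Decidable (Spec_quadrant n x1 y1 out) := by unfold Spec_quadrant; infer_instance

-- ===== CLAIM (what is proved, stated in full; the proofs are below) =====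
def Claim_equal_quadrant : Prop := ∀ (n : Int) (x1 : Int) (y1 : Int), Dom_quadrant n x1 y1 → Pre_quadrant n x1 y1 → Spec_quadrant n x1 y1 (quadrant n x1 y1)

-- ===== LEMMAS AND PROOFS =====

theorem quadrantLoop_eq (f : Nat) : ∀ (sign n x1 y1 : Int), 1 ≤ n → n.toNat ≤ f →
    quadrantLoop f sign n x1 y1 = sign * quadrantFuel f n x1 y1 := by
  induction f with
  | zero => intro sign n x1 y1 hn hf; omega
  | succ f ih =>
    intro sign n x1 y1 hn hf
    by_cases h1 : n = 1
    · simp [quadrantLoop, quadrantFuel, h1]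
    · have h2 : 2 ≤ n := by omega
      have hmid : PySem.Int.floordiv n 2 = n / 2 :=
        PySem.Int.floordiv_eq_ediv_of_pos (by omega)
      have hm1 : 1 ≤ n / 2 := by omega
      have hm2 : (n / 2).toNat ≤ f := by omega
      rw [quadrantLoop, quadrantFuel]
      simp only [h1, if_false, hmid]
      rcases lt_or_ge x1 (n / 2) with hx | hx <;> rcases lt_or_ge y1 (n / 2) with hy | hy
      · rw [if_neg (by omega), if_neg (not_le.mpr hx), if_neg (not_le.mpr hy),
          if_pos hx, if_pos hy, ih _ _ _ _ hm1 hm2]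
      · rw [if_neg (by omega), if_neg (not_le.mpr hx), if_pos hy,
          if_pos hx, if_neg (not_lt.mpr hy), ih _ _ _ _ hm1 hm2]
      · rw [if_neg (by omega), if_pos hx, if_neg (not_le.mpr hy),
          if_neg (not_lt.mpr hx), if_pos hy, ih _ _ _ _ hm1 hm2]
      · rw [if_pos ⟨hx, hy⟩, if_pos hx, if_pos hy,
          if_neg (not_lt.mpr hx), if_neg (not_lt.mpr hy), ih _ _ _ _ hm1 hm2]
        ring

-- ===== VERDICT (by name: the statement is the Claim_ definition above) =====
theorem quadrant_spec : Claim_equal_quadrant := by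
  intro n x1 y1 _ hpre
  unfold Spec_quadrant quadrant quadrant_alt
  rw [quadrantLoop_eq n.toNat 1 n x1 y1 hpre (le_refl _), one_mul]
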